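-- pv_equiv track=rewrite | github.com/shuhan-wang1/uk_rent_recommendation | local_data_demo/core/cuisine_classifier.py | classify_cuisine
-- ===== SOURCE A (Python) =====
-- def classify_cuisine(cuisine_tag: str) -> tuple[str, str]:
--     """
--     将 OSM cuisine 标签分类为常见菜系类型
--
--     Args:
--         cuisine_tag: OpenStreetMap 的 cuisine 值 (例如: "chinese", "italian", "pizza")
--
--     Returns:
--         (分类名称, 中文名称) 例如: ("chinese", "中餐")
--     """
--     if not cuisine_tag:
--         return ("other", "其他")
--
--     cuisine_lower = cuisine_tag.lower()
--
--     # 中餐系列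
--     chinese_keywords = ['chinese', 'cantonese', 'sichuan', 'dim_sum', 'asian']
--     if any(kw in cuisine_lower for kw in chinese_keywords):
--         return ("chinese", "中餐")
--
--     # 意大利菜系列
--     italian_keywords = ['italian', 'pizza', 'pasta']
--     if any(kw in cuisine_lower for kw in italian_keywords):
--         return ("italian", "意大利菜")
--
--     # 日本料理
--     japanese_keywords = ['japanese', 'sushi', 'ramen', 'izakaya']
--     if any(kw in cuisine_lower for kw in japanese_keywords):
--         return ("japanese", "日本料理")
--
--     # 韩国料理
--     korean_keywords = ['korean', 'bbq']
--     if any(kw in cuisine_lower for kw in korean_keywords):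
--         return ("korean", "韩国料理")
--
--     # 印度菜
--     indian_keywords = ['indian', 'curry', 'tandoori']
--     if any(kw in cuisine_lower for kw in indian_keywords):
--         return ("indian", "印度菜")
--
--     # 泰国菜
--     thai_keywords = ['thai', 'pad_thai']
--     if any(kw in cuisine_lower for kw in thai_keywords):
--         return ("thai", "泰国菜")
--
--     # 越南菜
--     vietnamese_keywords = ['vietnamese', 'pho']
--     if any(kw in cuisine_lower for kw in vietnamese_keywords):
--         return ("vietnamese", "越南菜")
--
--     # 希腊菜
--     greek_keywords = ['greek', 'mediterranean']
--     if any(kw in cuisine_lower for kw in greek_keywords):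
--         return ("greek", "希腊菜/地中海菜")
--
--     # 土耳其菜
--     turkish_keywords = ['turkish', 'kebab']
--     if any(kw in cuisine_lower for kw in turkish_keywords):
--         return ("turkish", "土耳其菜")
--
--     # 法国菜
--     french_keywords = ['french', 'bistro']
--     if any(kw in cuisine_lower for kw in french_keywords):
--         return ("french", "法国菜")
--
--     # 英国菜
--     british_keywords = ['british', 'fish_and_chips', 'pub']
--     if any(kw in cuisine_lower for kw in british_keywords):
--         return ("british", "英国菜")
--
--     # 美国菜
--     american_keywords = ['american', 'burger', 'steak']
--     if any(kw in cuisine_lower for kw in american_keywords):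
--         return ("american", "美国菜")
--
--     # 墨西哥菜
--     mexican_keywords = ['mexican', 'taco', 'burrito']
--     if any(kw in cuisine_lower for kw in mexican_keywords):
--         return ("mexican", "墨西哥菜")
--
--     # 中东菜
--     middle_eastern_keywords = ['lebanese', 'persian', 'middle_eastern', 'falafel']
--     if any(kw in cuisine_lower for kw in middle_eastern_keywords):
--         return ("middle_eastern", "中东菜")
--
--     # 快餐
--     fast_food_keywords = ['fast_food', 'sandwich', 'chicken']
--     if any(kw in cuisine_lower for kw in fast_food_keywords):
--         return ("fast_food", "快餐")
--
--     # 其他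
--     return ("other", "其他菜系")
-- ===== SOURCE B (Python) =====
-- # Keyword-index re-implementation: one flat ranked keyword table, a single
-- # min-rank pass over all entries instead of the priority-ordered if-chain.
-- _GROUPS = [
--     (['chinese', 'cantonese', 'sichuan', 'dim_sum', 'asian'], ("chinese", "中餐")),
--     (['italian', 'pizza', 'pasta'], ("italian", "意大利菜")),
--     (['japanese', 'sushi', 'ramen', 'izakaya'], ("japanese", "日本料理")),
--     (['korean', 'bbq'], ("korean", "韩国料理")),
--     (['indian', 'curry', 'tandoori'], ("indian", "印度菜")),
--     (['thai', 'pad_thai'], ("thai", "泰国菜")),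
--     (['vietnamese', 'pho'], ("vietnamese", "越南菜")),
--     (['greek', 'mediterranean'], ("greek", "希腊菜/地中海菜")),
--     (['turkish', 'kebab'], ("turkish", "土耳其菜")),
--     (['french', 'bistro'], ("french", "法国菜")),
--     (['british', 'fish_and_chips', 'pub'], ("british", "英国菜")),
--     (['american', 'burger', 'steak'], ("american", "美国菜")),
--     (['mexican', 'taco', 'burrito'], ("mexican", "墨西哥菜")),
--     (['lebanese', 'persian', 'middle_eastern', 'falafel'], ("middle_eastern", "中东菜")),
--     (['fast_food', 'sandwich', 'chicken'], ("fast_food", "快餐")),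
-- ]
-- _ENTRIES = [(kw, rank, res) for rank, (kws, res) in enumerate(_GROUPS) for kw in kws]
--
-- def classify_cuisine(cuisine_tag: str) -> tuple[str, str]:
--     if not cuisine_tag:
--         return ("other", "其他")
--     s = cuisine_tag.lower()
--     best = None
--     for kw, rank, res in _ENTRIES:
--         if kw in s and (best is None or rank < best[0]):
--             best = (rank, res)
--     return best[1] if best is not None else ("other", "其他菜系")
-- ===== Notes on version B (the rewrite author's own statement) =====
-- stated objective: alternative
-- what changed: Replaces the 15-branch priority if-chain with a flat ranked keyword table built by enumeration and a single min-rank fold over all entries, returning the category of the lowest-ranked matching keyword.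
import Mathlib
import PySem

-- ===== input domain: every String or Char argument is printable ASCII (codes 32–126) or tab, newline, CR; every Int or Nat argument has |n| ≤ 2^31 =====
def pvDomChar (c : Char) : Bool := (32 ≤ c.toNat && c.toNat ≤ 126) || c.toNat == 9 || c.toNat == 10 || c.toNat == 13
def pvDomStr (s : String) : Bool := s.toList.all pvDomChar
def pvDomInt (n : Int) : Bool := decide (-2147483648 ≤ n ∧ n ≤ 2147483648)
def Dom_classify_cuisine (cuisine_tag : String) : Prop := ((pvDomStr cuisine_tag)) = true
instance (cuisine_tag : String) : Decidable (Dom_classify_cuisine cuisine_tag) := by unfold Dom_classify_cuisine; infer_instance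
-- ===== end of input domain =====

-- B replaces A's priority-ordered if-chain by a flat ranked keyword table and one min-rank fold (alternative decomposition, same cost).


-- ===== PORT A =====
def classify_cuisine (cuisine_tag : String) : String × String :=
  if cuisine_tag = "" then ("other", "其他")
  else
    let cuisine_lower := PySem.Str.lower cuisine_tag
    if (["chinese", "cantonese", "sichuan", "dim_sum", "asian"]).any (fun kw => PySem.Str.isIn kw cuisine_lower) then ("chinese", "中餐")
    else if (["italian", "pizza", "pasta"]).any (fun kw => PySem.Str.isIn kw cuisine_lower) then ("italian", "意大利菜")
    else if (["japanese", "sushi", "ramen", "izakaya"]).any (fun kw => PySem.Str.isIn kw cuisine_lower) then ("japanese", "日本料理")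
    else if (["korean", "bbq"]).any (fun kw => PySem.Str.isIn kw cuisine_lower) then ("korean", "韩国料理")
    else if (["indian", "curry", "tandoori"]).any (fun kw => PySem.Str.isIn kw cuisine_lower) then ("indian", "印度菜")
    else if (["thai", "pad_thai"]).any (fun kw => PySem.Str.isIn kw cuisine_lower) then ("thai", "泰国菜")
    else if (["vietnamese", "pho"]).any (fun kw => PySem.Str.isIn kw cuisine_lower) then ("vietnamese", "越南菜")
    else if (["greek", "mediterranean"]).any (fun kw => PySem.Str.isIn kw cuisine_lower) then ("greek", "希腊菜/地中海菜")
    else if (["turkish", "kebab"]).any (fun kw => PySem.Str.isIn kw cuisine_lower) then ("turkish", "土耳其菜")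
    else if (["french", "bistro"]).any (fun kw => PySem.Str.isIn kw cuisine_lower) then ("french", "法国菜")
    else if (["british", "fish_and_chips", "pub"]).any (fun kw => PySem.Str.isIn kw cuisine_lower) then ("british", "英国菜")
    else if (["american", "burger", "steak"]).any (fun kw => PySem.Str.isIn kw cuisine_lower) then ("american", "美国菜")
    else if (["mexican", "taco", "burrito"]).any (fun kw => PySem.Str.isIn kw cuisine_lower) then ("mexican", "墨西哥菜")
    else if (["lebanese", "persian", "middle_eastern", "falafel"]).any (fun kw => PySem.Str.isIn kw cuisine_lower) then ("middle_eastern", "中东菜")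
    else if (["fast_food", "sandwich", "chicken"]).any (fun kw => PySem.Str.isIn kw cuisine_lower) then ("fast_food", "快餐")
    else ("other", "其他菜系")

-- ===== PORT B =====
def pvGroups : List (List String × (String × String)) :=
  [ (["chinese", "cantonese", "sichuan", "dim_sum", "asian"], ("chinese", "中餐")),
    (["italian", "pizza", "pasta"], ("italian", "意大利菜")),
    (["japanese", "sushi", "ramen", "izakaya"], ("japanese", "日本料理")),
    (["korean", "bbq"], ("korean", "韩国料理")),
    (["indian", "curry", "tandoori"], ("indian", "印度菜")),
    (["thai", "pad_thai"], ("thai", "泰国菜")),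
    (["vietnamese", "pho"], ("vietnamese", "越南菜")),
    (["greek", "mediterranean"], ("greek", "希腊菜/地中海菜")),
    (["turkish", "kebab"], ("turkish", "土耳其菜")),
    (["french", "bistro"], ("french", "法国菜")),
    (["british", "fish_and_chips", "pub"], ("british", "英国菜")),
    (["american", "burger", "steak"], ("american", "美国菜")),
    (["mexican", "taco", "burrito"], ("mexican", "墨西哥菜")),
    (["lebanese", "persian", "middle_eastern", "falafel"], ("middle_eastern", "中东菜")),
    (["fast_food", "sandwich", "chicken"], ("fast_food", "快餐")) ]

-- flat ranked keyword table: [(kw, rank, res) for rank, (kws, res) in enumerate(_GROUPS) for kw in kws]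
def pvEntries : List (String × Int × (String × String)) :=
  (PySem.List.enumerate pvGroups).flatMap (fun p => p.2.1.map (fun kw => (kw, p.1, p.2.2)))

-- one loop step: if kw in s and (best is None or rank < best[0]): best = (rank, res)
def pvStep (s : String) (best : Option (Int × (String × String))) (e : String × Int × (String × String)) :
    Option (Int × (String × String)) :=
  if PySem.Str.isIn e.1 s && (match best with | none => true | some (r, _) => decide (e.2.1 < r))
  then some (e.2.1, e.2.2) else best

def classify_cuisine_alt (cuisine_tag : String) : String × String :=
  if cuisine_tag = "" then ("other", "其他")
  else
    let s := PySem.Str.lower cuisine_tag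
    let best := pvEntries.foldl (pvStep s) none
    match best with
    | some (_, res) => res
    | none => ("other", "其他菜系")

-- ===== PRECONDITION & SPEC =====
def Spec_classify_cuisine (cuisine_tag : String) (out : String × String) : Prop := out = classify_cuisine_alt cuisine_tag
instance (cuisine_tag : String) (out : String × String) : Decidable (Spec_classify_cuisine cuisine_tag out) := by unfold Spec_classify_cuisine; infer_instance

-- ===== CLAIM (what is proved, stated in full; the proofs are below) =====
def Claim_equal_classify_cuisine : Prop := ∀ (cuisine_tag : String), Dom_classify_cuisine cuisine_tag → Spec_classify_cuisine cuisine_tag (classify_cuisine cuisine_tag)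

-- ===== LEMMAS AND PROOFS =====

-- the flat table, grouped: entries of group list gs with ranks starting at i
def pvFlat (i : Int) : List (List String × (String × String)) → List (String × Int × (String × String))
  | [] => []
  | g :: gs => g.1.map (fun kw => (kw, i, g.2)) ++ pvFlat (i + 1) gs

theorem pvEntries_eq_flat : pvEntries = pvFlat 0 pvGroups := by rfl

-- A's if-chain, abstractly: first group with a matching keyword
def pvScan (s : String) : List (List String × (String × String)) → String × String
  | [] => ("other", "其他菜系")
  | g :: gs => if g.1.any (fun kw => PySem.Str.isIn kw s) then g.2 else pvScan s gs

-- once best = some (r, v) with r ≤ every later rank, one group's entries leave it unchanged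
theorem pvStep_keep (s : String) (kws : List String) (i r : Int) (res v : String × String)
    (h : r ≤ i) : (kws.map (fun kw => (kw, i, res))).foldl (pvStep s) (some (r, v)) = some (r, v) := by
  induction kws with
  | nil => rfl
  | cons k ks ih =>
    simp only [List.map_cons, List.foldl_cons, pvStep]
    have : decide (i < r) = false := by simp; omega
    simp [this, ih]

-- from none, one group's entries produce some (i, res) iff some keyword matches
theorem pvFold_group (s : String) (kws : List String) (i : Int) (res : String × String) :
    (kws.map (fun kw => (kw, i, res))).foldl (pvStep s) none
      = if kws.any (fun kw => PySem.Str.isIn kw s) then some (i, res) else none := by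
  induction kws with
  | nil => rfl
  | cons k ks ih =>
    simp only [List.map_cons, List.foldl_cons, List.any_cons]
    by_cases hk : PySem.Str.isIn k s
    · simp only [PySem.Str.isIn_eq] at hk
      simp [pvStep, hk, pvStep_keep s ks i i res res le_rfl]
    · simp only [PySem.Str.isIn_eq] at hk
      simp [pvStep, hk, ih]

-- once best = some (r, v) with r ≤ i, all entries of pvFlat i gs leave it unchanged
theorem pvFlat_keep (s : String) (gs : List (List String × (String × String))) (i r : Int)
    (v : String × String) (h : r ≤ i) :
    (pvFlat i gs).foldl (pvStep s) (some (r, v)) = some (r, v) := by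
  induction gs generalizing i with
  | nil => rfl
  | cons g gs ih =>
    simp only [pvFlat, List.foldl_append]
    rw [pvStep_keep s g.1 i r g.2 v h, ih (i + 1) (by omega)]

-- the min-rank fold over the flat table computes the first-matching-group scan
theorem pvFold_flat (s : String) (gs : List (List String × (String × String))) (i : Int) :
    (match (pvFlat i gs).foldl (pvStep s) none with
      | some (_, res) => res
      | none => ("other", "其他菜系")) = pvScan s gs := by
  induction gs generalizing i with
  | nil => rfl
  | cons g gs ih =>
    simp only [pvFlat, List.foldl_append, pvFold_group, pvScan]
    by_cases hg : g.1.any (fun kw => PySem.Str.isIn kw s)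
    · simp only [List.any_eq_true, PySem.Str.isIn_eq] at hg
      simp [hg, pvFlat_keep s gs (i + 1) i g.2 (by omega)]
    · simp only [List.any_eq_true, PySem.Str.isIn_eq] at hg
      simp [hg, ih (i + 1)]

-- A's literal if-chain is the scan over the literal group table
theorem classify_eq_scan (t : String) (h : ¬ t = "") :
    classify_cuisine t = pvScan (PySem.Str.lower t) pvGroups := by
  simp only [classify_cuisine, if_neg h, pvScan, pvGroups]

-- ===== VERDICT (by name: the statement is the Claim_ definition above) =====
theorem classify_cuisine_spec : Claim_equal_classify_cuisine := by
  intro t _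
  unfold Spec_classify_cuisine classify_cuisine_alt
  by_cases h : t = ""
  · simp [classify_cuisine, h]
  · rw [if_neg h, classify_eq_scan t h, pvEntries_eq_flat]
    exact (pvFold_flat (PySem.Str.lower t) pvGroups 0).symm
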